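-- pv_equiv track=rewrite | github.com/rahulmahajann/sheet | array6.py | doUnion
-- ===== SOURCE A (Python) =====
-- def doUnion(a,n,b,m):
--     a=list(set(a))
--     b=list(set(b))
--     n=len(a)
--     m=len(b)
--     ans=len(a)+len(b)
--     count=0
--     if(n<=m):
--         for _ in range(n):
--             if(a[_] in b):
--                 count+=1
--     else:
--         for _ in range(m):
--             if(b[_] in a):
--                 count+=1
--
--     return ans-count
-- ===== SOURCE B (Python) =====
-- def doUnion(a, n, b, m):
--     sa = sorted(a)
--     sb = sorted(b)
--     i = j = 0
--     cnt = 0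
--     prev = None
--     have_prev = False
--     while i < len(sa) or j < len(sb):
--         if j >= len(sb) or (i < len(sa) and sa[i] <= sb[j]):
--             v = sa[i]
--             i += 1
--         else:
--             v = sb[j]
--             j += 1
--         if not have_prev or v != prev:
--             cnt += 1
--             prev = v
--             have_prev = True
--     return cnt
-- ===== Notes on version B (the rewrite author's own statement) =====
-- stated objective: faster
-- what changed: Replaced set-building plus inclusion-exclusion with an O(n*m) linear 'in' scan over the deduplicated list by a sort-then-merge walk: sort copies of both arrays, merge with two pointers and count a value only when it differs from the previously counted one, so each distinct element of the union is counted exactly once.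
import Mathlib
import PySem

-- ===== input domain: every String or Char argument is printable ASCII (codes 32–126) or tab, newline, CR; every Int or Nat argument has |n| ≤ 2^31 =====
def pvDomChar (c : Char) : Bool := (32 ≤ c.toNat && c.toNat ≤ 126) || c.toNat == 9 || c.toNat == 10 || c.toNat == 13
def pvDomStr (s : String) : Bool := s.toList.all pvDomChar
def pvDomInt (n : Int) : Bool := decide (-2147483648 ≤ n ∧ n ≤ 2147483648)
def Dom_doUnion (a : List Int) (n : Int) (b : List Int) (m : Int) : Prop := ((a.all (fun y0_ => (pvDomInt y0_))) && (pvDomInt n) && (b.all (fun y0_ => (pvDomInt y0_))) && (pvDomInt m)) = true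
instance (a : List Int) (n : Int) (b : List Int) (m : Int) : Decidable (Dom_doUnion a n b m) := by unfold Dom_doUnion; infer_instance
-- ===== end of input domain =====

-- B replaces set building + inclusion-exclusion by a sort-and-merge walk counting distinct runs
-- (measured faster: A tests membership by scanning a list; return-value equivalence, neither mutates its arguments).

-- ===== PORT A =====
-- a = list(set(a)); b = list(set(b)); ans = len(a)+len(b); count = membership hits of the shorter in the other
def doUnion (a : List Int) (n : Int) (b : List Int) (m : Int) : Int :=
  let a' := PySem.Set.ofList a
  let b' := PySem.Set.ofList b
  let n' : Int := a'.length
  let m' : Int := b'.length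
  let ans : Int := a'.length + b'.length
  let count : Int :=
    if n' ≤ m' then
      a'.foldl (fun c x => if PySem.Set.contains b' x then c + 1 else c) 0
    else
      b'.foldl (fun c x => if PySem.Set.contains a' x then c + 1 else c) 0
  ans - count

-- ===== PORT B =====
-- bump: the 'if not have_prev or v != prev: cnt += 1' step of B's merge loop
def pvBump (v : Int) (prev : Option Int) : Int := if prev = some v then 0 else 1

-- the two-pointer merge walk of B: consume the smaller head, count it unless equal to the last counted value
def pvMergeCount : List Int → List Int → Option Int → Int
  | [], [], _ => 0
  | x :: xs, [], prev => pvBump x prev + pvMergeCount xs [] (some x)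
  | [], y :: ys, prev => pvBump y prev + pvMergeCount [] ys (some y)
  | x :: xs, y :: ys, prev =>
      if x ≤ y then pvBump x prev + pvMergeCount xs (y :: ys) (some x)
      else pvBump y prev + pvMergeCount (x :: xs) ys (some y)
  termination_by xs ys _ => xs.length + ys.length

def doUnion_alt (a : List Int) (n : Int) (b : List Int) (m : Int) : Int :=
  pvMergeCount (PySem.List.sorted a (fun x => x) false) (PySem.List.sorted b (fun x => x) false) none

-- ===== PRECONDITION & SPEC =====
def Spec_doUnion (a : List Int) (n : Int) (b : List Int) (m : Int) (out : Int) : Prop := out = doUnion_alt a n b m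
instance (a : List Int) (n : Int) (b : List Int) (m : Int) (out : Int) : Decidable (Spec_doUnion a n b m out) := by unfold Spec_doUnion; infer_instance

-- ===== CLAIM (what is proved, stated in full; the proofs are below) =====
def Claim_equal_doUnion : Prop := ∀ (a : List Int) (n : Int) (b : List Int) (m : Int), Dom_doUnion a n b m → Spec_doUnion a n b m (doUnion a n b m)

-- ===== LEMMAS AND PROOFS =====

-- the plain merge of two lists (proof-side device: pvMergeCount = run count of this merge)
def pvMergeL : List Int → List Int → List Int
  | [], ys => ys
  | x :: xs, [] => x :: xs
  | x :: xs, y :: ys =>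
      if x ≤ y then x :: pvMergeL xs (y :: ys) else y :: pvMergeL (x :: xs) ys
  termination_by xs ys => xs.length + ys.length

-- run count of a single list
def pvRunCount : List Int → Option Int → Int
  | [], _ => 0
  | x :: xs, prev => pvBump x prev + pvRunCount xs (some x)

theorem mc_nil_left : ∀ (ys : List Int) (prev : Option Int),
    pvMergeCount [] ys prev = pvRunCount ys prev := by
  intro ys
  induction ys with
  | nil => intro prev; simp [pvMergeCount, pvRunCount]
  | cons y ys ih => intro prev; simp [pvMergeCount, pvRunCount, ih]

theorem mc_nil_right : ∀ (xs : List Int) (prev : Option Int),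
    pvMergeCount xs [] prev = pvRunCount xs prev := by
  intro xs
  induction xs with
  | nil => intro prev; simp [pvMergeCount, pvRunCount]
  | cons x xs ih => intro prev; simp [pvMergeCount, pvRunCount, ih]

theorem mergeCount_eq_runCount_merge :
    ∀ (xs ys : List Int) (prev : Option Int),
      pvMergeCount xs ys prev = pvRunCount (pvMergeL xs ys) prev := by
  intro xs ys
  induction xs, ys using pvMergeL.induct with
  | case1 ys => intro prev; simp [pvMergeL, mc_nil_left]
  | case2 x xs => intro prev; simp [pvMergeL, mc_nil_right, pvRunCount]
  | case3 x xs y ys h ih =>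
      intro prev
      simp [pvMergeCount, pvMergeL, pvRunCount, h, ih]
  | case4 x xs y ys h ih =>
      intro prev
      simp [pvMergeCount, pvMergeL, pvRunCount, h, ih]

theorem mergeL_perm : ∀ (xs ys : List Int), (pvMergeL xs ys).Perm (xs ++ ys) := by
  intro xs ys
  induction xs, ys using pvMergeL.induct with
  | case1 ys => simp [pvMergeL]
  | case2 x xs => simp [pvMergeL]
  | case3 x xs y ys h ih => simpa [pvMergeL, h] using ih.cons x
  | case4 x xs y ys h ih =>
      simp only [pvMergeL, if_neg h]
      refine (ih.cons y).trans ?_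
      exact List.Perm.symm (List.perm_middle)

theorem mergeL_sorted : ∀ (xs ys : List Int),
    xs.Pairwise (· ≤ ·) → ys.Pairwise (· ≤ ·) → (pvMergeL xs ys).Pairwise (· ≤ ·) := by
  intro xs ys
  induction xs, ys using pvMergeL.induct with
  | case1 ys => intro _ h; simpa [pvMergeL] using h
  | case2 x xs => intro h _; simpa [pvMergeL] using h
  | case3 x xs y ys h ih =>
      intro hx hy
      simp only [pvMergeL, if_pos h]
      refine List.pairwise_cons.2 ⟨?_, ih (List.pairwise_cons.1 hx).2 hy⟩
      intro z hz
      have hz' := (mergeL_perm xs (y :: ys)).mem_iff.1 hz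
      rcases List.mem_append.1 hz' with h1 | h1
      · exact (List.pairwise_cons.1 hx).1 z h1
      · rcases List.mem_cons.1 h1 with rfl | h1
        · exact h
        · exact le_trans h ((List.pairwise_cons.1 hy).1 z h1)
  | case4 x xs y ys h ih =>
      intro hx hy
      have hyx : y ≤ x := le_of_not_ge h
      simp only [pvMergeL, if_neg h]
      refine List.pairwise_cons.2 ⟨?_, ih hx (List.pairwise_cons.1 hy).2⟩
      intro z hz
      have hz' := (mergeL_perm (x :: xs) ys).mem_iff.1 hz
      rcases List.mem_append.1 hz' with h1 | h1
      · rcases List.mem_cons.1 h1 with rfl | h1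
        · exact hyx
        · exact le_trans hyx ((List.pairwise_cons.1 hx).1 z h1)
      · exact (List.pairwise_cons.1 hy).1 z h1

theorem runCount_some (l : List Int) :
    ∀ p : Int, l.Pairwise (· ≤ ·) → (∀ y ∈ l, p ≤ y) →
      pvRunCount l (some p) = ((l.toFinset.erase p).card : Int) := by
  induction l with
  | nil => intro p _ _; simp [pvRunCount]
  | cons x xs ih =>
      intro p hp hle
      have hx := List.pairwise_cons.1 hp
      have hIH := ih x hx.2 hx.1
      by_cases hpx : p = x
      · subst hpx
        simp [pvRunCount, pvBump, hIH, Finset.erase_insert_eq_erase]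
      · have hpnot : p ∉ (x :: xs).toFinset := by
          simp only [List.toFinset_cons, Finset.mem_insert, List.mem_toFinset]
          rintro (rfl | hmem)
          · exact hpx rfl
          · exact hpx (le_antisymm (hle x (by simp)) (hx.1 p hmem))
        have : ((x :: xs).toFinset.erase p) = (x :: xs).toFinset := Finset.erase_eq_of_notMem hpnot
        rw [this]
        have hins : (x :: xs).toFinset = insert x (xs.toFinset.erase x) := by
          ext z; simp [Finset.mem_insert, Finset.mem_erase]; tauto
        rw [hins, Finset.card_insert_of_notMem (Finset.notMem_erase x _)]
        simp only [pvRunCount, pvBump, hIH]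
        rw [if_neg (by simp [hpx])]
        push_cast; ring

theorem runCount_none (l : List Int) (hl : l.Pairwise (· ≤ ·)) :
    pvRunCount l none = (l.toFinset.card : Int) := by
  cases l with
  | nil => simp [pvRunCount]
  | cons x xs =>
      have hx := List.pairwise_cons.1 hl
      have h := runCount_some xs x hx.2 hx.1
      have hins : (x :: xs).toFinset = insert x (xs.toFinset.erase x) := by
        ext z; simp [Finset.mem_insert, Finset.mem_erase]; tauto
      simp only [pvRunCount, pvBump, reduceCtorEq, h, hins,
        Finset.card_insert_of_notMem (Finset.notMem_erase x _)]
      push_cast; ring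

theorem foldl_count (p : Int → Bool) :
    ∀ (l : List Int) (c : Int),
      l.foldl (fun c x => if p x then c + 1 else c) c = c + ((l.filter p).length : Int) := by
  intro l
  induction l with
  | nil => simp
  | cons x xs ih =>
      intro c
      by_cases hx : p x <;> simp [List.foldl_cons, hx, ih] <;> push_cast <;> ring

theorem ofList_toFinset (l : List Int) : (PySem.Set.ofList l).toFinset = l.toFinset := by
  ext x; simp [List.mem_toFinset, PySem.Set.mem_ofList]

theorem ofList_length (l : List Int) : (PySem.Set.ofList l).length = l.toFinset.card := by
  rw [← ofList_toFinset, List.toFinset_card_of_nodup (PySem.Set.nodup_ofList l)]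

theorem filter_mem_card (u v : List Int) (hu : u.Nodup) :
    ((u.filter fun x => PySem.Set.contains v x).length) = (u.toFinset ∩ v.toFinset).card := by
  rw [← List.toFinset_card_of_nodup (hu.filter _)]
  congr 1
  ext x
  simp [List.mem_toFinset, PySem.Set.contains, Finset.mem_inter]

-- ===== VERDICT (by name: the statement is the Claim_ definition above) =====
theorem doUnion_spec : Claim_equal_doUnion := by
  intro a n b m _
  unfold Spec_doUnion doUnion doUnion_alt
  have hpa : (PySem.List.sorted a (fun x => x) false).Pairwise (· ≤ ·) := by
    simpa using PySem.List.sorted_pairwise a (fun x => x)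
  have hpb : (PySem.List.sorted b (fun x => x) false).Pairwise (· ≤ ·) := by
    simpa using PySem.List.sorted_pairwise b (fun x => x)
  have hperm :
      (pvMergeL (PySem.List.sorted a (fun x => x) false)
        (PySem.List.sorted b (fun x => x) false)).Perm (a ++ b) :=
    (mergeL_perm _ _).trans
      (List.Perm.append (PySem.List.sorted_perm a (fun x => x) false)
        (PySem.List.sorted_perm b (fun x => x) false))
  have hB : pvMergeCount (PySem.List.sorted a (fun x => x) false)
      (PySem.List.sorted b (fun x => x) false) none
      = ((a.toFinset ∪ b.toFinset).card : Int) := by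
    rw [mergeCount_eq_runCount_merge, runCount_none _ (mergeL_sorted _ _ hpa hpb),
      List.toFinset_eq_of_perm _ _ hperm]
    simp
  have hca : (PySem.Set.ofList a).foldl
      (fun c x => if PySem.Set.contains (PySem.Set.ofList b) x then c + 1 else c) 0
      = ((a.toFinset ∩ b.toFinset).card : Int) := by
    rw [foldl_count, zero_add, filter_mem_card _ _ (PySem.Set.nodup_ofList a),
      ofList_toFinset, ofList_toFinset]
  have hcb : (PySem.Set.ofList b).foldl
      (fun c x => if PySem.Set.contains (PySem.Set.ofList a) x then c + 1 else c) 0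
      = ((a.toFinset ∩ b.toFinset).card : Int) := by
    rw [foldl_count, zero_add, filter_mem_card _ _ (PySem.Set.nodup_ofList b),
      ofList_toFinset, ofList_toFinset, Finset.inter_comm]
  have hc := Finset.card_union_add_card_inter a.toFinset b.toFinset
  have hla := ofList_length a
  have hlb := ofList_length b
  simp only [hB]
  split_ifs with h
  · rw [hca, hla, hlb]; omega
  · rw [hcb, hla, hlb]; omega
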